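-- pv_equiv track=rewrite | github.com/w7a8n1y4a/pepeunit_backend | app/repositories/grafana_repository.py | enumerate_refid
-- ===== SOURCE A (Python) =====
-- import string
--
-- def enumerate_refid(iterable, start=0):
--     def refid_generator():
--         letters = string.ascii_uppercase
--         length = 1
--         while True:
--             for i in range(len(letters) ** length):
--                 result = ""
--                 n = i
--                 for _ in range(length):
--                     result = letters[n % len(letters)] + result
--                     n //= len(letters)
--                 yield result
--             length += 1
--
--     gen = refid_generator()
--     for _ in range(start):
--         next(gen)
--     for item in iterable:
--         yield next(gen), item
-- ===== SOURCE B (Python) =====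
-- import string
--
-- def enumerate_refid(iterable, start=0):
--     # Direct base-26 ("Excel column") closed form: the label of global index g
--     # is the bijective-base-26 numeral of g+1, computed per item from its
--     # absolute index instead of stepping a label generator.
--     letters = string.ascii_uppercase
--     k = start if start > 0 else 0
--     for offset, item in enumerate(iterable):
--         n = k + offset + 1
--         chars = []
--         while n > 0:
--             n, r = divmod(n - 1, 26)
--             chars.append(letters[r])
--         yield ''.join(reversed(chars)), item
-- ===== Notes on version B (the rewrite author's own statement) =====
-- stated objective: alternative
-- what changed: Replaces the sequential generator that yields and skips labels one by one with a closed-form bijective-base-26 ('Excel column') conversion computed directly from each item's absolute index.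
import Mathlib
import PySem

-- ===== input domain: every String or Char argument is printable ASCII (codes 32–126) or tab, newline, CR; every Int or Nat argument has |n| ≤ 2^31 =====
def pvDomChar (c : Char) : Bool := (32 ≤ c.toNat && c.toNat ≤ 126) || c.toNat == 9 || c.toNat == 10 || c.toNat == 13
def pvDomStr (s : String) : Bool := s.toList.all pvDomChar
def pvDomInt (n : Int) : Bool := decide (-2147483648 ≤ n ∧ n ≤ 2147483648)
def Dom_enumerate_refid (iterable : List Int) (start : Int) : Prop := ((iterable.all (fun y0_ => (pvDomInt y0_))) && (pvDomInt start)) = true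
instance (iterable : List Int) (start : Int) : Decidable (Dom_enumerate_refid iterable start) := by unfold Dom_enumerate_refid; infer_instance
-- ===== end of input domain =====

-- B replaces A's sequential generator (yield/skip labels one by one) with a closed-form
-- bijective-base-26 conversion from each item's absolute index (objective: alternative).

-- string.ascii_uppercase (shared by both Pythons)
def pyLetters : List Char := "ABCDEFGHIJKLMNOPQRSTUVWXYZ".toList

-- ===== PORT A =====
-- inner `for _ in range(length)` loop of A: result = letters[n % 26] + result; n //= 26
-- (n is nonnegative throughout in A, so Nat `% / ` is exact here)
def aLabelLoop : Nat → Nat → List Char → List Char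
  | 0, _, acc => acc
  | t + 1, n, acc => aLabelLoop t (n / 26) (pyLetters.getD (n % 26) 'A' :: acc)

def aLabel (i length : Nat) : String := String.mk (aLabelLoop length i [])

-- one `next()` of A's refid_generator, as its state machine on (length, i):
-- either still inside the `for i in range(26 ** length)` block, or move to the next block
def genStep (st : Nat × Nat) : String × Nat × Nat :=
  if st.2 < 26 ^ st.1 then (aLabel st.2 st.1, st.1, st.2 + 1)
  else (aLabel 0 (st.1 + 1), st.1 + 1, 1)

-- `for _ in range(start): next(gen)`  (range(start) is empty for start ≤ 0, matching Int.toNat)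
def genSkip : Nat → Nat × Nat → Nat × Nat
  | 0, st => st
  | k + 1, st => genSkip k (genStep st).2

-- `for item in iterable: yield next(gen), item`
def genEmit : List Int → Nat × Nat → List (String × Int)
  | [], _ => []
  | x :: xs, st => ((genStep st).1, x) :: genEmit xs (genStep st).2

def enumerate_refid (iterable : List Int) (start : Int) : List (String × Int) :=
  genEmit iterable (genSkip start.toNat (1, 0))

-- ===== PORT B =====
-- B's `while n > 0: n, r = divmod(n - 1, 26); chars.append(letters[r])`
-- (n ≥ 1 at every call in B, so the Nat transcription of divmod is exact)
def bChars : Nat → List Char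
  | 0 => []
  | m + 1 => pyLetters.getD (m % 26) 'A' :: bChars (m / 26)
decreasing_by exact Nat.lt_succ_of_le (Nat.div_le_self _ _)

-- ''.join(reversed(chars))
def bLabel (n : Nat) : String := String.mk (bChars n).reverse

def enumerate_refid_alt (iterable : List Int) (start : Int) : List (String × Int) :=
  let k : Int := if start > 0 then start else 0
  (PySem.List.enumerate iterable 0).map (fun p => (bLabel ((k + p.1).toNat + 1), p.2))

-- ===== PRECONDITION & SPEC =====
def Spec_enumerate_refid (iterable : List Int) (start : Int) (out : List (String × Int)) : Prop := out = enumerate_refid_alt iterable start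
instance (iterable : List Int) (start : Int) (out : List (String × Int)) : Decidable (Spec_enumerate_refid iterable start out) := by unfold Spec_enumerate_refid; infer_instance

-- ===== CLAIM (what is proved, stated in full; the proofs are below) =====
def Claim_equal_enumerate_refid : Prop := ∀ (iterable : List Int) (start : Int), Dom_enumerate_refid iterable start → Spec_enumerate_refid iterable start (enumerate_refid iterable start)

-- ===== LEMMAS AND PROOFS =====

-- label of global index g (what both programs emit at absolute position g)
def pvF (g : Nat) : String := bLabel (g + 1)

-- pvS L = 26 + 26^2 + ... + 26^L, the number of labels of length <= L
def pvS : Nat → Nat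
  | 0 => 0
  | L + 1 => 26 * (pvS L + 1)

lemma pvS_closed : ∀ L, 25 * pvS L + 26 = 26 ^ (L + 1) := by
  intro L
  induction L with
  | zero => simp [pvS]
  | succ L ih =>
      show 25 * (26 * (pvS L + 1)) + 26 = 26 ^ (L + 2)
      have h : 25 * (26 * (pvS L + 1)) + 26 = 26 * (25 * pvS L + 26) := by ring
      rw [h, ih]
      ring

lemma pvS_succ (L : Nat) : pvS (L + 1) = pvS L + 26 ^ (L + 1) := by
  have h := pvS_closed L
  show 26 * (pvS L + 1) = pvS L + 26 ^ (L + 1)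
  omega

-- the L low-to-high base-26 digits of i, as letters
def pvPad : Nat → Nat → List Char
  | _, 0 => []
  | i, t + 1 => pyLetters.getD (i % 26) 'A' :: pvPad (i / 26) t

lemma aLabelLoop_eq (t : Nat) : ∀ n acc, aLabelLoop t n acc = (pvPad n t).reverse ++ acc := by
  induction t with
  | zero => intro n acc; simp [aLabelLoop, pvPad]
  | succ t ih => intro n acc; simp [aLabelLoop, pvPad, ih]

lemma aLabel_eq (i L : Nat) : aLabel i L = String.mk (pvPad i L).reverse := by
  simp [aLabel, aLabelLoop_eq]

-- key digit lemma: the bijective-base-26 numeral of pvS L + i + 1 (0 ≤ i < 26^(L+1))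
-- is exactly i written with L+1 base-26 digits
lemma bChars_block : ∀ L i, i < 26 ^ (L + 1) → bChars (pvS L + i + 1) = pvPad i (L + 1) := by
  intro L
  induction L with
  | zero =>
      intro i hi
      have h26 : i < 26 := by simpa using hi
      have e : pvS 0 + i + 1 = i + 1 := by simp [pvS]
      rw [e, bChars]
      have hd : i / 26 = 0 := Nat.div_eq_of_lt h26
      simp [pvPad, hd, bChars]
  | succ L ih =>
      intro i hi
      have hn : pvS (L + 1) + i + 1 = (26 * (pvS L + 1) + i) + 1 := by simp [pvS]
      rw [hn, bChars]
      have hmod : (26 * (pvS L + 1) + i) % 26 = i % 26 := by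
        omega
      have hdiv : (26 * (pvS L + 1) + i) / 26 = pvS L + i / 26 + 1 := by
        rw [Nat.mul_add_div (by norm_num)]
        omega
      have hi' : i / 26 < 26 ^ (L + 1) := by
        have hlt : i < 26 * 26 ^ (L + 1) := by
          have hp : (26 : Nat) ^ (L + 1 + 1) = 26 * 26 ^ (L + 1) := by ring
          omega
        exact Nat.div_lt_of_lt_mul hlt
      rw [hmod, hdiv, ih (i / 26) hi']
      rfl

-- invariant: generator state st corresponds to absolute index g
def pvRep (g : Nat) (st : Nat × Nat) : Prop :=
  ∃ L i, st = (L + 1, i) ∧ i ≤ 26 ^ (L + 1) ∧ g = pvS L + i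

lemma step_rep {g : Nat} {st : Nat × Nat} (h : pvRep g st) :
    (genStep st).1 = pvF g ∧ pvRep (g + 1) (genStep st).2 := by
  obtain ⟨L, i, hst, hle, hg⟩ := h
  subst hst hg
  by_cases hlt : i < 26 ^ (L + 1)
  · constructor
    · show (genStep (L + 1, i)).1 = pvF (pvS L + i)
      simp only [genStep, hlt, if_pos]
      rw [aLabel_eq, pvF, bLabel, bChars_block L i hlt]
    · refine ⟨L, i + 1, ?_, by omega, by omega⟩
      simp [genStep, hlt]
  · have hi : i = 26 ^ (L + 1) := by omega
    subst hi
    have hns : ¬ (26 ^ (L + 1) < 26 ^ (L + 1)) := lt_irrefl _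
    constructor
    · show (genStep (L + 1, 26 ^ (L + 1))).1 = pvF (pvS L + 26 ^ (L + 1))
      simp only [genStep]
      rw [if_neg hns, aLabel_eq, pvF, bLabel]
      have h0 : (0 : Nat) < 26 ^ (L + 1 + 1) := Nat.pow_pos (by norm_num)
      have hb := bChars_block (L + 1) 0 h0
      simp only [Nat.add_zero] at hb
      rw [← pvS_succ L, hb]
    · refine ⟨L + 1, 1, ?_, Nat.one_le_pow _ _ (by norm_num), ?_⟩
      · simp only [genStep]
        rw [if_neg hns]
      · have := pvS_succ L
        omega

lemma skip_rep : ∀ (k g : Nat) (st : Nat × Nat), pvRep g st → pvRep (g + k) (genSkip k st) := by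
  intro k
  induction k with
  | zero => intro g st h; simpa [genSkip] using h
  | succ k ih =>
      intro g st h
      have h' := (step_rep h).2
      have hrec := ih (g + 1) _ h'
      have e : g + 1 + k = g + (k + 1) := by omega
      rw [e] at hrec
      rw [genSkip]
      exact hrec

lemma emitA : ∀ (xs : List Int) (g : Nat) (st : Nat × Nat), pvRep g st →
    genEmit xs st = (PySem.List.enumerate xs (g : Int)).map (fun p => (pvF p.1.toNat, p.2)) := by
  intro xs
  induction xs with
  | nil => intro g st _; rw [genEmit, PySem.List.enumerate_nil, List.map_nil]
  | cons x xs ih =>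
      intro g st h
      obtain ⟨h1, h2⟩ := step_rep h
      rw [genEmit, h1, ih (g + 1) _ h2, PySem.List.enumerate_cons, List.map_cons]
      have e : ((g : Int) + 1) = ((g + 1 : Nat) : Int) := by push_cast; ring
      rw [e]
      simp

lemma emitB (k : Nat) : ∀ (xs : List Int) (s : Nat),
    (PySem.List.enumerate xs (s : Int)).map (fun p => (bLabel (((k : Int) + p.1).toNat + 1), p.2))
      = (PySem.List.enumerate xs ((k + s : Nat) : Int)).map (fun p => (pvF p.1.toNat, p.2)) := by
  intro xs
  induction xs with
  | nil => intro s; simp [PySem.List.enumerate_nil]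
  | cons x xs ih =>
      intro s
      rw [PySem.List.enumerate_cons, PySem.List.enumerate_cons, List.map_cons, List.map_cons]
      have h2 : ((s : Int) + 1) = ((s + 1 : Nat) : Int) := by push_cast; ring
      have h3 : ((k + s : Nat) : Int) + 1 = ((k + (s + 1) : Nat) : Int) := by push_cast; ring
      rw [h2, h3, ih (s + 1)]
      have h1 : ((k : Int) + (s : Int)).toNat = k + s := by omega
      simp [h1, pvF]

-- ===== VERDICT (by name: the statement is the Claim_ definition above) =====
theorem enumerate_refid_spec : Claim_equal_enumerate_refid := by
  intro iterable start _
  show enumerate_refid iterable start = enumerate_refid_alt iterable start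
  have hrep0 : pvRep 0 (1, 0) := ⟨0, 0, rfl, by norm_num, by simp [pvS]⟩
  have hskip := skip_rep start.toNat 0 (1, 0) hrep0
  simp only [Nat.zero_add] at hskip
  rw [enumerate_refid, emitA iterable start.toNat _ hskip, enumerate_refid_alt]
  have hk : (if start > 0 then start else 0) = ((start.toNat : Nat) : Int) := by
    split_ifs with h <;> omega
  simp only [hk]
  have hB := emitB start.toNat iterable 0
  simp only [Nat.cast_zero, Nat.add_zero] at hB
  rw [hB]
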